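-- pv_equiv track=rewrite | github.com/connorkitchings/project-manager | src/project_manager/services/normalizer.py | _extract_summary_paragraph
-- ===== SOURCE A (Python) =====
-- def _extract_summary_paragraph(text: str | None) -> str | None:
--     """Extract the first paragraph under a markdown summary heading."""
--     if not text:
--         return None
--
--     lines = text.splitlines()
--     in_summary = False
--     collected: list[str] = []
--     for line in lines:
--         stripped = line.strip()
--         if stripped.startswith("## "):
--             if in_summary:
--                 break
--             in_summary = stripped.lower() == "## summary"
--             continue
--         if not in_summary:
--             continue
--         if not stripped:
--             if collected:
--                 break
--             continue
--         if stripped.startswith("#"):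
--             break
--         collected.append(stripped)
--
--     if not collected:
--         return None
--     return " ".join(collected)
-- ===== SOURCE B (Python) =====
-- def _extract_summary_paragraph(text: str | None) -> str | None:
--     """Two-phase: locate the '## summary' heading, then collect its first paragraph."""
--     if not text:
--         return None
--     it = iter(text.splitlines())
--     for line in it:
--         if line.strip().lower() == "## summary":
--             break
--     else:
--         return None
--     collected: list[str] = []
--     for line in it:
--         stripped = line.strip()
--         if stripped.startswith("#"):
--             break
--         if not stripped:
--             if collected:
--                 break
--             continue
--         collected.append(stripped)
--     if not collected:
--         return None
--     return " ".join(collected)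
-- ===== Notes on version B (the rewrite author's own statement) =====
-- stated objective: alternative
-- what changed: A's single pass with an in_summary boolean state machine is replaced by a two-phase scan: first locate the summary heading line, then a separate stateless collection loop over the remaining lines gathers the first paragraph.
import Mathlib
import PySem

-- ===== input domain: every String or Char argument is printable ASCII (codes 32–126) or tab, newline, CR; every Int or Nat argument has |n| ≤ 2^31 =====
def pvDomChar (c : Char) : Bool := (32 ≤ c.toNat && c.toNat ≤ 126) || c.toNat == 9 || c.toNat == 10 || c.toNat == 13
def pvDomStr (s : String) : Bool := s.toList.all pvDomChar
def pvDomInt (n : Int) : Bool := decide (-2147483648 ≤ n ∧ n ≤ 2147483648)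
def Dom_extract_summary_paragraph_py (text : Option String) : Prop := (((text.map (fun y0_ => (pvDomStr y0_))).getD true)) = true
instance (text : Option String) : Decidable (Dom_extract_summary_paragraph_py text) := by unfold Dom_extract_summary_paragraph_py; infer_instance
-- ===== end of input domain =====

-- B replaces A's single-pass in_summary state machine by a two-phase scan (locate the
-- summary heading, then collect the paragraph after it); same cost, different decomposition.

-- ===== PORT A =====
-- A's single for-loop with state (in_summary, collected); returning `coll` = Python's `break`.
def pvALoop : List String → Bool → List String → List String
  | [], _, coll => coll
  | line :: rest, ins, coll =>
    let stripped := PySem.Str.strip line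
    if PySem.Str.startswith stripped "## " then
      if ins then coll
      else pvALoop rest (PySem.Str.lower stripped == "## summary") coll
    else if ins = false then pvALoop rest ins coll
    else if stripped == "" then
      if coll == [] then pvALoop rest ins coll else coll
    else if PySem.Str.startswith stripped "#" then coll
    else pvALoop rest ins (coll ++ [stripped])

def extract_summary_paragraph_py (text : Option String) : Option String :=
  match text with
  | none => none
  | some t =>
    if t == "" then none
    else
      let collected := pvALoop (PySem.Str.splitlines t) false []
      if collected == [] then none
      else some (PySem.Str.join " " collected)

-- ===== PORT B =====
-- B phase 1: find the '## summary' heading line; `some rest` = the iterator after the break.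
def pvBFindRest : List String → Option (List String)
  | [] => none
  | line :: rest =>
    let stripped := PySem.Str.strip line
    if PySem.Str.startswith stripped "## " && (PySem.Str.lower stripped == "## summary") then
      some rest
    else pvBFindRest rest

-- B phase 2: collect the first paragraph from the remaining lines.
def pvBCollect : List String → List String → List String
  | [], coll => coll
  | line :: rest, coll =>
    let stripped := PySem.Str.strip line
    if PySem.Str.startswith stripped "#" then coll
    else if stripped == "" then
      if coll == [] then pvBCollect rest coll else coll
    else pvBCollect rest (coll ++ [stripped])

def extract_summary_paragraph_py_alt (text : Option String) : Option String :=
  match text with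
  | none => none
  | some t =>
    if t == "" then none
    else
      match pvBFindRest (PySem.Str.splitlines t) with
      | none => none
      | some rest =>
        let collected := pvBCollect rest []
        if collected == [] then none
        else some (PySem.Str.join " " collected)

-- ===== PRECONDITION & SPEC =====
def Spec_extract_summary_paragraph_py (text : Option String) (out : Option String) : Prop := out = extract_summary_paragraph_py_alt text
instance (text : Option String) (out : Option String) : Decidable (Spec_extract_summary_paragraph_py text out) := by unfold Spec_extract_summary_paragraph_py; infer_instance

-- ===== CLAIM (what is proved, stated in full; the proofs are below) =====
def Claim_equal_extract_summary_paragraph_py : Prop := ∀ (text : Option String), Dom_extract_summary_paragraph_py text → Spec_extract_summary_paragraph_py text (extract_summary_paragraph_py text)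

-- ===== LEMMAS AND PROOFS =====

-- a line starting with "## " starts with "#"
lemma pv_hash_of_hh (cs : List Char) (h : PySem.Chars.startswith cs ['#', '#', ' '] = true) :
    PySem.Chars.startswith cs ['#'] = true := by
  rw [PySem.Chars.startswith_iff] at h ⊢
  exact List.IsPrefix.trans (by decide) h

lemma pv_strip_toList_nil (s : String) (h : PySem.Str.strip s = "") :
    PySem.Chars.strip s.toList = [] := by
  have := congrArg String.toList h
  simpa using this

-- a line starting with "#" is not blank
lemma pv_not_blank_of_hash (s : String)
    (h : PySem.Chars.startswith (PySem.Chars.strip s.toList) ['#'] = true) :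
    ¬ (PySem.Str.strip s = "") := by
  intro h2
  rw [pv_strip_toList_nil s h2] at h
  exact absurd h (by decide)

-- once in the summary section, A's remaining loop is B's collection phase
lemma pv_collect_eq : ∀ (ls coll : List String), pvALoop ls true coll = pvBCollect ls coll := by
  intro ls
  induction ls with
  | nil => intro coll; rfl
  | cons l rest ih =>
    intro coll
    simp only [pvALoop, pvBCollect]
    by_cases h3 : PySem.Chars.startswith (PySem.Chars.strip l.toList) ['#'] = true
    · by_cases h1 : PySem.Chars.startswith (PySem.Chars.strip l.toList) ['#', '#', ' '] = true
      · simp [h1, h3]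
      · simp [h1, h3, pv_not_blank_of_hash l h3]
    · have h1 : ¬ PySem.Chars.startswith (PySem.Chars.strip l.toList) ['#', '#', ' '] = true :=
        fun hh => h3 (pv_hash_of_hh _ hh)
      by_cases h2 : PySem.Str.strip l = ""
      · have e1 : PySem.Chars.startswith ([] : List Char) ['#', '#', ' '] = false := by decide
        have e2 : PySem.Chars.startswith ([] : List Char) ['#'] = false := by decide
        simp [h2, ih, e1, e2]
      · simp [h1, h2, h3, ih]

-- before the heading is found, A's loop is B's search phase followed by the collection phase
lemma pv_find_eq : ∀ (ls : List String),
    pvALoop ls false [] =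
      (match pvBFindRest ls with
       | none => []
       | some rest => pvALoop rest true []) := by
  intro ls
  induction ls with
  | nil => rfl
  | cons l rest ih =>
    simp only [pvALoop, pvBFindRest]
    by_cases h1 : PySem.Chars.startswith (PySem.Chars.strip l.toList) ['#', '#', ' '] = true
    · by_cases hs : PySem.Str.lower (PySem.Str.strip l) = "## summary"
      · simp [h1, hs]
      · have hb : (PySem.Str.lower (PySem.Str.strip l) == "## summary") = false :=
          beq_eq_false_iff_ne.mpr hs
        simp [h1, hb, ih]
    · simp [h1, ih]

lemma pv_main (text : Option String) :
    extract_summary_paragraph_py text = extract_summary_paragraph_py_alt text := by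
  cases text with
  | none => rfl
  | some t =>
    by_cases ht : t = ""
    · subst ht; rfl
    · simp only [extract_summary_paragraph_py, extract_summary_paragraph_py_alt]
      rw [pv_find_eq (PySem.Str.splitlines t)]
      cases h : pvBFindRest (PySem.Str.splitlines t) with
      | none => simp [ht]
      | some rest => simp [ht, pv_collect_eq]

-- ===== VERDICT (by name: the statement is the Claim_ definition above) =====
theorem extract_summary_paragraph_py_spec : Claim_equal_extract_summary_paragraph_py := by
  intro text _
  unfold Spec_extract_summary_paragraph_py
  exact pv_main text
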